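-- pv_equiv track=rewrite | github.com/Hardik-7892/advent_of_code_2025_python | day3.py | max_in_range
-- ===== SOURCE A (Python) =====
-- def max_in_range(seq, start, end):
--     """
--     Returns the largest digit in seq[start:end] and its position.
--     """
--     max_digit = -1
--     max_pos = -1
--     for i in range(start, end):
--         digit = int(seq[i])
--         if digit > max_digit:
--             max_digit = digit
--             max_pos = i
--     return max_digit, max_pos
-- ===== SOURCE B (Python) =====
-- def max_in_range(seq, start, end):
--     """
--     Returns the largest digit in seq[start:end] and its position.
--     Two-pass version: first the max value, then the first index holding it.
--     """
--     max_digit = max((int(seq[i]) for i in range(start, end)), default=-1)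
--     max_pos = -1
--     for i in range(start, end):
--         if int(seq[i]) == max_digit:
--             max_pos = i
--             break
--     return max_digit, max_pos
-- ===== Notes on version B (the rewrite author's own statement) =====
-- stated objective: alternative
-- what changed: Replaced the single combined max-and-position scan by two differently-shaped passes: a value-only max with default=-1, then a first-match search with break for the position.
import Mathlib
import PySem

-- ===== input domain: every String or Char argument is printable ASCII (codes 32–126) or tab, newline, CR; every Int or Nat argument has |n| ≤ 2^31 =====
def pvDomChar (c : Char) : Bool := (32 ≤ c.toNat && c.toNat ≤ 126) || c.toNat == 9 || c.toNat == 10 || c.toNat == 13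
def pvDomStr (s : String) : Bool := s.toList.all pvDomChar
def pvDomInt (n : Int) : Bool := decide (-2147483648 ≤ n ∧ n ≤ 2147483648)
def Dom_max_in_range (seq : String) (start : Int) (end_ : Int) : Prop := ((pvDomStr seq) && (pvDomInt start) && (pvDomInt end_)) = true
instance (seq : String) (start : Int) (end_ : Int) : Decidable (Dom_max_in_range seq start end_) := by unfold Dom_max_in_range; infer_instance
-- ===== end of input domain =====

-- B replaces A's single combined max-and-position scan by two passes (value-only max, then
-- a first-match search); objective: alternative decomposition, same cost.

-- ===== PORT A =====
-- int(seq[i]) for an in-range digit character; 0 is a junk value on inputs where the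
-- Python raises (those are excluded by Pre_max_in_range, so it is never claimed about).
def digitAt (seq : String) (i : Int) : Int :=
  match PySem.Str.pyGet? seq i with
  | some c => (c.toNat : Int) - 48
  | none => 0

def max_in_range (seq : String) (start : Int) (end_ : Int) : Int × Int :=
  (PySem.List.pyRange start end_ 1).foldl
    (fun (st : Int × Int) i =>
      let digit := digitAt seq i
      if digit > st.1 then (digit, i) else st)
    (-1, -1)

-- ===== PORT B =====
-- second pass: 'for i in range(start, end): if int(seq[i]) == max_digit: max_pos = i; break'
def firstMatch (seq : String) (md : Int) : List Int → Int
  | [] => -1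
  | i :: rest => if digitAt seq i == md then i else firstMatch seq md rest

def max_in_range_alt (seq : String) (start : Int) (end_ : Int) : Int × Int :=
  let max_digit := ((PySem.List.pyRange start end_ 1).map (digitAt seq)).foldl max (-1)
  let max_pos := firstMatch seq max_digit (PySem.List.pyRange start end_ 1)
  (max_digit, max_pos)

-- ===== PRECONDITION & SPEC =====
-- Pre_ excludes exactly the inputs where Python A raises: an index in range(start, end)
-- out of string range (IndexError) or pointing at a non-digit character (ValueError of int()).
def okAt (seq : String) (i : Int) : Bool :=
  match PySem.Str.pyGet? seq i with
  | some c => 48 ≤ c.toNat && c.toNat ≤ 57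
  | none => false

def Pre_max_in_range (seq : String) (start : Int) (end_ : Int) : Prop :=
  end_ ≤ start ∨
    (-(seq.toList.length : Int) ≤ start ∧ end_ ≤ (seq.toList.length : Int) ∧
      ∀ i ∈ PySem.List.pyRange start end_ 1, okAt seq i = true)
instance (seq : String) (start : Int) (end_ : Int) : Decidable (Pre_max_in_range seq start end_) := by
  unfold Pre_max_in_range; infer_instance

def pvWitness_max_in_range : String × Int × Int := ("35192", 1, 4)

def Spec_max_in_range (seq : String) (start : Int) (end_ : Int) (out : Int × Int) : Prop :=
  out = max_in_range_alt seq start end_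
instance (seq : String) (start : Int) (end_ : Int) (out : Int × Int) : Decidable (Spec_max_in_range seq start end_ out) := by
  unfold Spec_max_in_range; infer_instance

-- ===== CLAIM (what is proved, stated in full; the proofs are below) =====
def Claim_equal_max_in_range : Prop := ∀ (seq : String) (start : Int) (end_ : Int), Dom_max_in_range seq start end_ → Pre_max_in_range seq start end_ → Spec_max_in_range seq start end_ (max_in_range seq start end_)

-- ===== LEMMAS AND PROOFS =====

theorem le_foldl_max (f : Int → Int) (l : List Int) (b : Int) :
    b ≤ l.foldl (fun a i => max a (f i)) b := by
  induction l generalizing b with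
  | nil => simp
  | cons x xs ih => exact le_trans (le_max_left b (f x)) (ih (max b (f x)))

theorem firstMatch_cons (seq : String) (md i : Int) (rest : List Int) :
    firstMatch seq md (i :: rest) = if digitAt seq i == md then i else firstMatch seq md rest := rfl

-- A's fold, from an arbitrary accumulator, expressed by B's two passes.
theorem foldA_eq (seq : String) (l : List Int) (md mp : Int) :
    l.foldl (fun (st : Int × Int) i =>
        let digit := digitAt seq i
        if digit > st.1 then (digit, i) else st) (md, mp)
      = (l.foldl (fun a i => max a (digitAt seq i)) md,
         if l.foldl (fun a i => max a (digitAt seq i)) md = md then mp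
         else firstMatch seq (l.foldl (fun a i => max a (digitAt seq i)) md) l) := by
  induction l generalizing md mp with
  | nil => simp
  | cons i rest ih =>
    simp only [List.foldl_cons]
    by_cases h : digitAt seq i > md
    · have hmax : max md (digitAt seq i) = digitAt seq i := max_eq_right (le_of_lt h)
      rw [if_pos h, ih, hmax]
      have hM : digitAt seq i ≤ rest.foldl (fun a j => max a (digitAt seq j)) (digitAt seq i) :=
        le_foldl_max (digitAt seq) rest (digitAt seq i)
      have hne : rest.foldl (fun a j => max a (digitAt seq j)) (digitAt seq i) ≠ md := by omega
      rw [if_neg hne, firstMatch_cons]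
      simp only [beq_iff_eq]
      by_cases he : digitAt seq i = rest.foldl (fun a j => max a (digitAt seq j)) (digitAt seq i)
      · rw [if_pos he.symm, if_pos he]
      · rw [if_neg (fun hh => he hh.symm), if_neg he]
    · have hmax : max md (digitAt seq i) = md := max_eq_left (not_lt.mp h)
      rw [if_neg h, ih, hmax]
      by_cases he : rest.foldl (fun a j => max a (digitAt seq j)) md = md
      · rw [if_pos he, if_pos he]
      · rw [if_neg he, if_neg he]
        have hM : md ≤ rest.foldl (fun a j => max a (digitAt seq j)) md :=
          le_foldl_max (digitAt seq) rest md
        have hd : digitAt seq i ≠ rest.foldl (fun a j => max a (digitAt seq j)) md := by omega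
        rw [firstMatch_cons]
        simp only [beq_iff_eq]
        rw [if_neg hd]

theorem digit_nonneg (seq : String) (i : Int) (h : okAt seq i = true) :
    0 ≤ digitAt seq i := by
  unfold okAt at h
  unfold digitAt
  cases hg : PySem.Str.pyGet? seq i with
  | none => rw [hg] at h
  | some c => rw [hg] at h; simp at h ⊢; omega

theorem firstMatch_neg_one (seq : String) (l : List Int)
    (hok : ∀ i ∈ l, okAt seq i = true) : firstMatch seq (-1) l = -1 := by
  induction l with
  | nil => rfl
  | cons i rest ih =>
    have h0 : 0 ≤ digitAt seq i := digit_nonneg seq i (hok i List.mem_cons_self)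
    rw [firstMatch_cons, if_neg (by simp; omega)]
    exact ih (fun j hj => hok j (List.mem_cons_of_mem _ hj))

-- ===== VERDICT (by name: the statement is the Claim_ definition above) =====
theorem max_in_range_spec : Claim_equal_max_in_range := by
  intro seq start end_ _ hpre
  have hall : ∀ i ∈ PySem.List.pyRange start end_ 1, okAt seq i = true := by
    rcases hpre with h | ⟨_, _, h⟩
    · intro i hi; rw [PySem.List.pyRange_one_eq_nil h] at hi; cases hi
    · exact h
  unfold Spec_max_in_range max_in_range max_in_range_alt
  rw [foldA_eq]
  simp only [List.foldl_map]
  by_cases he : (PySem.List.pyRange start end_ 1).foldl (fun a i => max a (digitAt seq i)) (-1) = -1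
  · rw [if_pos he, he, firstMatch_neg_one seq _ hall]
  · rw [if_neg he]
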